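-- pv_equiv track=rewrite | github.com/fernando-pacheco/hacker-rank | credit_card_validation.py | count_group
-- ===== SOURCE A (Python) =====
-- def count_group(credit_card):
--     count_digit = 0
--     for i in credit_card:
--         if i.isdigit():
--             count_digit += 1
--         elif count_digit != 4:
--             return False
--         else:
--             count_digit = 0
--     return True
-- ===== SOURCE B (Python) =====
-- def count_group(credit_card):
--     positions = [i for i, ch in enumerate(credit_card) if not ch.isdigit()]
--     prev = -1
--     for p in positions:
--         if p - prev != 5:
--             return False
--         prev = p
--     return True
-- ===== Notes on version B (the rewrite author's own statement) =====
-- stated objective: alternative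
-- what changed: Instead of streaming a digit counter that resets at each delimiter, B first collects all delimiter positions via enumerate and then checks consecutive positions are exactly 5 apart starting from -1.
import Mathlib
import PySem

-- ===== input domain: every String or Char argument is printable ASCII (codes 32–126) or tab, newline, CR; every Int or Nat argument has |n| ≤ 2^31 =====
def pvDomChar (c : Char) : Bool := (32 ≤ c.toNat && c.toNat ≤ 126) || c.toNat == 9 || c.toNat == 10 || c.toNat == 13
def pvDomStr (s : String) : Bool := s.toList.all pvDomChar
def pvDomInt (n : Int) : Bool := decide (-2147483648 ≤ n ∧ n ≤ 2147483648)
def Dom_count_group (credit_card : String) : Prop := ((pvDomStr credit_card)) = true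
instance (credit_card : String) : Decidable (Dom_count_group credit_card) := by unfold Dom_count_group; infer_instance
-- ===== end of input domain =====

-- B collects delimiter positions first and checks gaps of 5, instead of A's resetting digit counter (alternative decomposition).


-- ===== PORT A =====
-- A's loop with early return: structural recursion carrying the digit counter.
def countGroupLoopA : List Char → Int → Bool
  | [], _ => true
  | c :: rest, cnt =>
    if PySem.Chars.isdigit c then countGroupLoopA rest (cnt + 1)
    else if cnt ≠ 4 then false
    else countGroupLoopA rest 0

def count_group (credit_card : String) : Bool :=
  countGroupLoopA credit_card.toList 0

-- ===== PORT B =====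
-- positions = [i for i, ch in enumerate(credit_card) if not ch.isdigit()]
def countGroupPositions (cs : List Char) (k : Int) : List Int :=
  ((PySem.List.enumerate cs k).filter (fun pc => !PySem.Chars.isdigit pc.2)).map (·.1)

-- the 'for p in positions' loop with early return, carrying prev
def countGroupLoopB : List Int → Int → Bool
  | [], _ => true
  | p :: rest, prev => if p - prev ≠ 5 then false else countGroupLoopB rest p

def count_group_alt (credit_card : String) : Bool :=
  countGroupLoopB (countGroupPositions credit_card.toList 0) (-1)

-- ===== PRECONDITION & SPEC =====
def Spec_count_group (credit_card : String) (out : Bool) : Prop := out = count_group_alt credit_card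
instance (credit_card : String) (out : Bool) : Decidable (Spec_count_group credit_card out) := by unfold Spec_count_group; infer_instance

-- ===== CLAIM (what is proved, stated in full; the proofs are below) =====
def Claim_equal_count_group : Prop := ∀ (credit_card : String), Dom_count_group credit_card → Spec_count_group credit_card (count_group credit_card)

-- ===== LEMMAS AND PROOFS =====

-- Invariant: A's counter cnt corresponds to B's prev = k - cnt - 1 (k = index of the next char).
theorem countGroup_loop_eq (cs : List Char) : ∀ (k cnt : Int),
    countGroupLoopA cs cnt = countGroupLoopB (countGroupPositions cs k) (k - cnt - 1) := by
  induction cs with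
  | nil => intro k cnt; simp [countGroupLoopA, countGroupPositions, countGroupLoopB]
  | cons c rest ih =>
    intro k cnt
    by_cases hd : PySem.Chars.isdigit c = true
    · have : countGroupPositions (c :: rest) k = countGroupPositions rest (k + 1) := by
        simp [countGroupPositions, PySem.List.enumerate_cons, hd]
      rw [this, countGroupLoopA, if_pos hd]
      have := ih (k + 1) (cnt + 1)
      simpa [show k + 1 - (cnt + 1) - 1 = k - cnt - 1 by ring] using this
    · have hpos : countGroupPositions (c :: rest) k = k :: countGroupPositions rest (k + 1) := by
        simp [countGroupPositions, PySem.List.enumerate_cons, hd]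
      rw [hpos, countGroupLoopA, if_neg hd]
      by_cases h4 : cnt = 4
      · have hne : ¬ (k - (k - cnt - 1) ≠ 5) := by omega
        rw [if_neg (by simpa [h4]), countGroupLoopB, if_neg hne]
        have h0 := ih (k + 1) 0
        rw [show k + 1 - 0 - 1 = k from by ring] at h0
        exact h0
      · have hne : k - (k - cnt - 1) ≠ 5 := by omega
        rw [if_pos (by simpa using h4), countGroupLoopB, if_pos hne]

-- ===== VERDICT (by name: the statement is the Claim_ definition above) =====
theorem count_group_spec : Claim_equal_count_group := by
  intro s _
  unfold Spec_count_group count_group count_group_alt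
  simpa using countGroup_loop_eq s.toList 0 0
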